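-- pv_equiv track=rewrite | github.com/wwunlp/sner | readnames.py | getKgrams
-- ===== SOURCE A (Python) =====
-- from collections import defaultdict
--
-- def getKgrams(names, k):
--     """
--     names is assumed to be a dictionary with keys representing names
--      and values their occurences
--     k is the max order of grams you wish to retrieve
--     -1 will return a list containing a dictionary of monograms
--     -2 will return a list with a dict of monograms followed by
--      a dict of bigrams
--     Example use for monogram, bigram, and trigrams:
--     getKgrams(getPNs(), 3)
--     """
--     grams = [None] * k
--
--     for i in range(0, k):
--             grams[i] = defaultdict(int)
--
--     for name, value in names.items():
--         syllables = name.split('-')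
--
--         for i in range(1, k + 1):
--             end = len(syllables) - i + 1
--             for j in range(0, end):
--                 gram = '-'.join(syllables[j:j + i])
--                 grams[i-1][gram] = grams[i-1][gram] + value
--
--     return grams
-- ===== SOURCE B (Python) =====
-- from collections import defaultdict
--
-- def getKgrams(names, k):
--     # Build each i-gram by extending the previous one, one pass per start index.
--     grams = [defaultdict(int) for _ in range(k)]
--     if k <= 0:
--         return grams
--     for name, value in names.items():
--         syllables = name.split('-')
--         n = len(syllables)
--         for j in range(n):
--             gram = syllables[j]
--             grams[0][gram] += value
--             m = 1
--             while j + m < n and m < k: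
--                 gram += '-' + syllables[j + m]
--                 grams[m][gram] += value
--                 m += 1
--     return grams
-- ===== Notes on version B (the rewrite author's own statement) =====
-- stated objective: faster
-- what changed: A re-joins the slice syllables[j:j+i] from scratch for every (i, j) pair in a gram-order-outer loop; B loops once over start positions and grows one accumulator string per start, extending each i-gram from the (i-1)-gram in O(1) amortized, with the k<=0 short-circuit kept.
import Mathlib
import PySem

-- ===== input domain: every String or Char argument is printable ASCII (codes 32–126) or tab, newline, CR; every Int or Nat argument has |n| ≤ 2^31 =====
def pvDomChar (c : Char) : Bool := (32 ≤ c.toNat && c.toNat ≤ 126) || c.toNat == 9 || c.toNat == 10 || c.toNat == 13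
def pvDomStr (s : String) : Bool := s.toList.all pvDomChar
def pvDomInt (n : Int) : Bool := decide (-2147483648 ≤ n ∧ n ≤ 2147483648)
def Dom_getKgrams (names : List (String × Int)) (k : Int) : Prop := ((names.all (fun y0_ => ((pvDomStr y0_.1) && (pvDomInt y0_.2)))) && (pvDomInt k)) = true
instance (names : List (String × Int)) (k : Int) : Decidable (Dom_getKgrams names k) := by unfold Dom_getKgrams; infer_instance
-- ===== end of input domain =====

-- B builds every i-gram by extending one accumulator string per start index (one pass
-- over start positions) instead of re-slicing and re-joining for every (i, j); objective:
-- alternative.  `names` models a Python dict, so Pre_ requires its keys to be distinct.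

-- ===== PORT A =====
def getKgrams (names : List (String × Int)) (k : Int) : List (List (String × Int)) :=
  let grams0 : List (PySem.Dict String Int) :=
    (PySem.List.pyRange 0 k 1).map (fun _ => PySem.Dict.empty)
  let grams :=
    names.foldl (fun grams nv =>
      let syllables := (PySem.Str.split? nv.1 "-").getD []
      (PySem.List.pyRange 1 (k + 1) 1).foldl (fun grams i =>
        let e : Int := (syllables.length : Int) - i + 1
        (PySem.List.pyRange 0 e 1).foldl (fun grams j =>
          let gram := PySem.Str.join "-" (PySem.List.slice syllables (some j) (some (j + i)))
          grams.modify (i - 1).toNat (fun d => d.modify gram 0 (· + nv.2))) grams) grams) grams0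
  grams.map PySem.Dict.items

-- ===== PORT B =====
-- the `while j + m < n and m < k` loop of Source B (gram is the growing accumulator string)
def bWhile (syll : List String) (k v : Int) (j n m : Nat) (gram : List Char)
    (grams : List (PySem.Dict String Int)) : List (PySem.Dict String Int) :=
  if h : j + m < n ∧ (m : Int) < k then
    let gram' := gram ++ '-' :: (syll.getD (j + m) "").toList
    let grams' := grams.modify m (fun d => d.modify (String.ofList gram') 0 (· + v))
    bWhile syll k v j n (m + 1) gram' grams'
  else grams
termination_by n - (j + m)
decreasing_by omega

def getKgrams_alt (names : List (String × Int)) (k : Int) : List (List (String × Int)) :=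
  let grams0 : List (PySem.Dict String Int) :=
    (PySem.List.pyRange 0 k 1).map (fun _ => PySem.Dict.empty)
  if k ≤ 0 then grams0.map PySem.Dict.items
  else
    (names.foldl (fun grams nv =>
      let syllables := (PySem.Str.split? nv.1 "-").getD []
      let n := syllables.length
      (List.range n).foldl (fun grams j =>
        let gram := (syllables.getD j "").toList
        let grams := grams.modify 0 (fun d => d.modify (String.ofList gram) 0 (· + nv.2))
        bWhile syllables k nv.2 j n 1 gram grams) grams) grams0).map PySem.Dict.items

-- ===== PRECONDITION & SPEC =====
-- names models a Python dict (A iterates names.items()): its keys are distinct.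
def Pre_getKgrams (names : List (String × Int)) (k : Int) : Prop :=
  (names.map Prod.fst).Nodup
instance (names : List (String × Int)) (k : Int) : Decidable (Pre_getKgrams names k) := by
  unfold Pre_getKgrams; infer_instance
def pvWitness_getKgrams : (List (String × Int)) × Int := ([("a-b-a", 2), ("a", 3)], 3)
def Spec_getKgrams (names : List (String × Int)) (k : Int) (out : List (List (String × Int))) : Prop := out = getKgrams_alt names k
instance (names : List (String × Int)) (k : Int) (out : List (List (String × Int))) : Decidable (Spec_getKgrams names k out) := by unfold Spec_getKgrams; infer_instance

-- ===== CLAIM (what is proved, stated in full; the proofs are below) =====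
def Claim_equal_getKgrams : Prop := ∀ (names : List (String × Int)) (k : Int), Dom_getKgrams names k → Pre_getKgrams names k → Spec_getKgrams names k (getKgrams names k)

-- ===== LEMMAS AND PROOFS =====

-- one defaultdict increment: d[g] = d[g] + v
def updG (v : Int) (g : String) (d : PySem.Dict String Int) : PySem.Dict String Int :=
  d.modify g 0 (· + v)

-- a sequence of (dict index, key) increments applied to the list of dicts
def applyOps (v : Int) (ops : List (Nat × String)) (gs : List (PySem.Dict String Int)) :
    List (PySem.Dict String Int) :=
  ops.foldl (fun gs p => gs.modify p.1 (updG v p.2)) gs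

-- the (i)-gram of `syll` starting at position j (i = number of syllables)
def keyS (syll : List String) (j i : Nat) : String :=
  PySem.Str.join "-" ((syll.drop j).take i)

-- the increments one name contributes, in A's order (gram order outer, start inner)
def opsA (syll : List String) (kn : Nat) : List (Nat × String) :=
  (List.range kn).flatMap (fun t =>
    (List.range (syll.length - t)).map (fun u => (t, keyS syll u (t + 1))))

-- the same increments in B's order (start outer, gram order inner)
def opsB (syll : List String) (kn : Nat) : List (Nat × String) :=
  (List.range syll.length).flatMap (fun j =>
    (List.range (min (syll.length - j) kn)).map (fun t => (t, keyS syll j (t + 1))))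

lemma pyRange_one_eq (a b : Int) :
    PySem.List.pyRange a b 1 = (List.range (b - a).toNat).map (fun t : Nat => a + (t : Int)) := by
  rw [PySem.List.pyRange_of_pos a b one_pos]
  have h1 : (b - a + 1 - 1) / 1 = b - a := by omega
  rw [h1]
  have h2 : (if a < b then (b - a).toNat else 0) = (b - a).toNat := by
    split_ifs with h <;> omega
  rw [h2]
  simp only [one_mul]

lemma applyOps_getElem? (v : Int) (ops : List (Nat × String))
    (gs : List (PySem.Dict String Int)) (m : Nat) :
    (applyOps v ops gs)[m]? =
      gs[m]?.map (fun d =>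
        ((ops.filter (fun p => p.1 == m)).map Prod.snd).foldl (fun d g => updG v g d) d) := by
  induction ops generalizing gs with
  | nil => cases h : gs[m]? <;> simp [applyOps, h]
  | cons p t ih =>
    show (applyOps v t (gs.modify p.1 (updG v p.2)))[m]? = _
    rw [ih, List.getElem?_modify]
    by_cases h : p.1 = m
    · subst h
      cases hg : gs[p.1]? <;> simp [hg, List.filter_cons]
    · have hb : (p.1 == m) = false := by simp [h]
      cases hg : gs[m]? <;> simp [hg, List.filter_cons, hb, h]

lemma applyOps_ext (v : Int) (ops1 ops2 : List (Nat × String))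
    (gs : List (PySem.Dict String Int))
    (h : ∀ m, ops1.filter (fun p => p.1 == m) = ops2.filter (fun p => p.1 == m)) :
    applyOps v ops1 gs = applyOps v ops2 gs := by
  apply List.ext_getElem?
  intro m
  rw [applyOps_getElem?, applyOps_getElem?, h m]

lemma filter_range_beq (M m : Nat) :
    (List.range M).filter (fun t => t == m) = if m < M then [m] else [] := by
  induction M with
  | zero => simp
  | succ M ih =>
    rw [List.range_succ, List.filter_append, ih]
    by_cases h : m < M
    · simp [h, Nat.lt_succ_of_lt h, Nat.ne_of_gt h]
    · by_cases h2 : M = m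
      · subst h2; simp [h]
      · have : ¬ m < M + 1 := by omega
        simp [h, h2, this]

lemma flatMap_range_if_lt {α : Type} (n c : Nat) (f : Nat → α) :
    (List.range n).flatMap (fun j => if j < c then [f j] else []) =
      (List.range (min c n)).map f := by
  induction n with
  | zero => simp
  | succ n ih =>
    rw [List.range_succ, List.flatMap_append, ih]
    by_cases h : n < c
    · have h1 : min c (n + 1) = min c n + 1 := by omega
      rw [h1, List.range_succ, List.map_append]
      have h2 : min c n = n := by omega
      simp [h, h2]
    · have h1 : min c (n + 1) = min c n := by omega
      simp [h, h1]

lemma flatMap_range_if_eq {α : Type} (kn m : Nat) (L : List α) :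
    (List.range kn).flatMap (fun x => if x = m then L else []) =
      if m < kn then L else [] := by
  induction kn with
  | zero => simp
  | succ kn ih =>
    rw [List.range_succ, List.flatMap_append, ih]
    by_cases h : m < kn
    · have : kn ≠ m := by omega
      simp [h, this, Nat.lt_succ_of_lt h]
    · by_cases h2 : kn = m
      · subst h2; simp [h]
      · have : ¬ m < kn + 1 := by omega
        simp [h, h2, this]

lemma join_append_singleton (sep y : List Char) (xs : List (List Char)) (h : xs ≠ []) :
    PySem.Chars.join sep (xs ++ [y]) = PySem.Chars.join sep xs ++ sep ++ y := by
  induction xs with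
  | nil => simp at h
  | cons x t ih =>
    cases t with
    | nil => simp [PySem.Chars.join_cons_cons, PySem.Chars.join_singleton]
    | cons x2 t2 =>
      show PySem.Chars.join sep (x :: x2 :: (t2 ++ [y])) = _
      rw [PySem.Chars.join_cons_cons]
      have ih' := ih (by simp)
      rw [List.cons_append] at ih'
      rw [ih', PySem.Chars.join_cons_cons]
      simp

lemma keyS_one (syll : List String) (j : Nat) (h : j < syll.length) :
    keyS syll j 1 = syll.getD j "" := by
  have hd : (syll.drop j).take 1 = [syll.getD j ""] := by
    have : syll.drop j = syll.getD j "" :: syll.drop (j + 1) := by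
      rw [List.getD_eq_getElem _ _ h]
      exact List.drop_eq_getElem_cons h
    rw [this, List.take_succ_cons, List.take_zero]
  rw [keyS, hd, PySem.Str.join]
  simp [PySem.Chars.join_singleton]

lemma keyS_succ (syll : List String) (j i : Nat) (h : j + i < syll.length) (hi : 1 ≤ i) :
    (keyS syll j (i + 1)).toList =
      (keyS syll j i).toList ++ '-' :: (syll.getD (j + i) "").toList := by
  have hlen : i < (syll.drop j).length := by simp; omega
  have htake : (syll.drop j).take (i + 1) = (syll.drop j).take i ++ [(syll.drop j).getD i ""] := by
    rw [List.take_succ]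
    simp [List.getElem?_eq_getElem hlen, List.getD_eq_getElem _ _ hlen]
  have hgd : (syll.drop j).getD i "" = syll.getD (j + i) "" := by
    rw [List.getD_eq_getElem _ _ hlen, List.getElem_drop, List.getD_eq_getElem _ _ h]
  have hne : ((syll.drop j).take i).map String.toList ≠ [] := by
    simp [List.take_eq_nil_iff]
    omega
  rw [keyS, keyS, PySem.Str.toList_join, PySem.Str.toList_join, htake, hgd,
    List.map_append, List.map_singleton, join_append_singleton _ _ _ hne]
  simp

lemma bWhile_spec (syll : List String) (k v : Int) (j : Nat) :
    ∀ (m : Nat) (gram : List Char) (gs : List (PySem.Dict String Int)),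
    1 ≤ m → j < syll.length → gram = (keyS syll j m).toList →
    bWhile syll k v j syll.length m gram gs =
      applyOps v ((List.range' m (min (syll.length - j) k.toNat - m)).map
        (fun t => (t, keyS syll j (t + 1)))) gs := by
  intro m
  generalize hc : min (syll.length - j) k.toNat - m = c
  induction c generalizing m with
  | zero =>
    intro gram gs hm hj hg
    have hcond : ¬ (j + m < syll.length ∧ (m : Int) < k) := by omega
    rw [bWhile, dif_neg hcond]
    simp [applyOps]
  | succ c ih =>
    intro gram gs hm hj hg
    have hcond : j + m < syll.length ∧ (m : Int) < k := by
      constructor <;> omega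
    rw [bWhile, dif_pos hcond]
    simp only []
    have hg' : gram ++ '-' :: (syll.getD (j + m) "").toList = (keyS syll j (m + 1)).toList := by
      rw [hg, (keyS_succ syll j m hcond.1 hm).symm]
    rw [hg']
    have hc' : min (syll.length - j) k.toNat - (m + 1) = c := by omega
    rw [ih (m + 1) hc' _ _ (by omega) hj rfl]
    rw [String.ofList_toList]
    have hr : List.range' m (c + 1) = m :: List.range' (m + 1) c := List.range'_succ
    rw [hr]
    rfl

lemma opsA_filter (syll : List String) (kn m : Nat) :
    (opsA syll kn).filter (fun p => p.1 == m) =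
      if m < kn then (List.range (syll.length - m)).map (fun u => (m, keyS syll u (m + 1))) else [] := by
  rw [opsA, List.filter_flatMap]
  have h : ∀ t : Nat,
      ((List.range (syll.length - t)).map (fun u => (t, keyS syll u (t + 1)))).filter (fun p => p.1 == m)
        = if t = m then (List.range (syll.length - m)).map (fun u => (m, keyS syll u (m + 1))) else [] := by
    intro t
    rw [List.filter_map]
    by_cases h : t = m
    · subst h; simp [Function.comp_def]
    · simp [Function.comp_def, h]
  simp only [h]
  rw [flatMap_range_if_eq]

lemma opsB_filter (syll : List String) (kn m : Nat) :
    (opsB syll kn).filter (fun p => p.1 == m) =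
      if m < kn then (List.range (syll.length - m)).map (fun u => (m, keyS syll u (m + 1))) else [] := by
  rw [opsB, List.filter_flatMap]
  have h : ∀ j : Nat,
      ((List.range (min (syll.length - j) kn)).map (fun t => (t, keyS syll j (t + 1)))).filter (fun p => p.1 == m)
        = if m < min (syll.length - j) kn then [(m, keyS syll j (m + 1))] else [] := by
    intro j
    rw [List.filter_map]
    have : (List.range (min (syll.length - j) kn)).filter
        ((fun p => p.1 == m) ∘ (fun t => (t, keyS syll j (t + 1)))) =
        (List.range (min (syll.length - j) kn)).filter (fun t => t == m) := by
      rfl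
    rw [this, filter_range_beq]
    split_ifs <;> simp
  simp only [h]
  by_cases hm : m < kn
  · have h2 : ∀ j : Nat, (if m < min (syll.length - j) kn then [(m, keyS syll j (m + 1))] else [])
        = if j < syll.length - m then [(m, keyS syll j (m + 1))] else [] := by
      intro j
      split_ifs with a b <;> first | rfl | omega
    simp only [h2]
    rw [flatMap_range_if_lt]
    have h3 : min (syll.length - m) syll.length = syll.length - m := by omega
    rw [h3, if_pos hm]
  · have h2 : ∀ j : Nat, (if m < min (syll.length - j) kn then [(m, keyS syll j (m + 1))] else [])
        = ([] : List (Nat × String)) := by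
      intro j; rw [if_neg]; omega
    simp only [h2]
    simp [hm]

lemma stepA_eq (syll : List String) (k v : Int) (gs : List (PySem.Dict String Int)) :
    (PySem.List.pyRange 1 (k + 1) 1).foldl (fun grams i =>
        (PySem.List.pyRange 0 ((syll.length : Int) - i + 1) 1).foldl (fun grams j =>
          grams.modify (i - 1).toNat
            (fun d => d.modify (PySem.Str.join "-" (PySem.List.slice syll (some j) (some (j + i)))) 0
              (· + v))) grams) gs = applyOps v (opsA syll k.toNat) gs := by
  have h1 : (k + 1 - 1 : Int) = k := by ring
  rw [pyRange_one_eq 1 (k + 1), h1, List.foldl_map]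
  have h2 : ∀ t : Nat, PySem.List.pyRange 0 ((syll.length : Int) - (1 + (t : Int)) + 1) 1
      = (List.range (syll.length - t)).map (fun u : Nat => (0 : Int) + (u : Int)) := by
    intro t
    rw [pyRange_one_eq]
    congr 2
    omega
  simp only [h2, List.foldl_map]
  have h3 : ∀ t u : Nat,
      PySem.List.slice syll (some ((0 : Int) + (u : Int))) (some ((0 : Int) + (u : Int) + (1 + (t : Int))))
        = (syll.drop u).take (t + 1) := by
    intro t u
    have e1 : ((0 : Int) + (u : Int)) = ((u : Nat) : Int) := by ring
    have e2 : ((u : Int) + (1 + (t : Int))) = (((u + (t + 1)) : Nat) : Int) := by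
      push_cast; ring
    rw [e1, e2, PySem.List.slice_natCast]
    congr 1
    omega
  simp only [h3]
  have h4 : ∀ t : Nat, ((1 + (t : Int)) - 1).toNat = t := by intro t; omega
  simp only [h4]
  rw [applyOps, opsA, List.foldl_flatMap]
  simp only [List.foldl_map]
  rfl

lemma stepB_eq (syll : List String) (k v : Int) (hk : 0 < k)
    (gs : List (PySem.Dict String Int)) :
    (List.range syll.length).foldl (fun grams j =>
        bWhile syll k v j syll.length 1 ((syll.getD j "").toList)
          (grams.modify 0 (fun d => d.modify (String.ofList ((syll.getD j "").toList)) 0 (· + v)))) gs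
      = applyOps v (opsB syll k.toNat) gs := by
  rw [applyOps, opsB, List.foldl_flatMap]
  apply PySem.List.foldl_congr_mem
  intro acc j hj
  rw [List.mem_range] at hj
  have hof : String.ofList ((syll.getD j "").toList) = keyS syll j 1 := by
    rw [String.ofList_toList, keyS_one syll j hj]
  rw [hof]
  rw [bWhile_spec syll k v j 1 _ _ le_rfl hj (by rw [keyS_one syll j hj])]
  have hM : 1 ≤ min (syll.length - j) k.toNat := by omega
  have hr : List.range (min (syll.length - j) k.toNat)
      = 0 :: List.range' 1 (min (syll.length - j) k.toNat - 1) := by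
    rw [List.range_eq_range']
    have : min (syll.length - j) k.toNat = (min (syll.length - j) k.toNat - 1) + 1 := by omega
    rw [this, List.range'_succ]
    norm_num
  rw [hr]
  rfl

-- ===== VERDICT (by name: the statement is the Claim_ definition above) =====
theorem getKgrams_spec : Claim_equal_getKgrams := by
  intro names k _ _
  show getKgrams names k = getKgrams_alt names k
  by_cases hk : k ≤ 0
  · have hgr : PySem.List.pyRange 0 k 1 = [] := by
      rw [pyRange_one_eq]
      have : (k - 0).toNat = 0 := by omega
      rw [this, List.range_zero, List.map_nil]
    have hpr : PySem.List.pyRange 1 (k + 1) 1 = [] := by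
      rw [pyRange_one_eq]
      have : (k + 1 - 1).toNat = 0 := by omega
      rw [this, List.range_zero, List.map_nil]
    simp only [getKgrams, getKgrams_alt, hgr, hpr, if_pos hk, List.map_nil, List.foldl_nil]
    rw [PySem.List.foldl_ignore]
    rfl
  · rw [not_le] at hk
    simp only [getKgrams, getKgrams_alt, if_neg (not_le.mpr hk)]
    congr 1
    apply PySem.List.foldl_congr_mem
    intro gs nv _
    rw [stepA_eq ((PySem.Str.split? nv.1 "-").getD []) k nv.2 gs,
      stepB_eq ((PySem.Str.split? nv.1 "-").getD []) k nv.2 hk gs]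
    exact applyOps_ext _ _ _ _ (fun m => by rw [opsA_filter, opsB_filter])
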